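-- pv_equiv track=rewrite | github.com/jamester234/Advent-of-Code-2015 | Day 12 Part 2.py | has_red
-- ===== SOURCE A (Python) =====
-- def has_red(string_object):
--     left_brace_count = 0
--     left_square_count = 0
--     for i in range(len(string_object) - 2):
--         if string_object[i] == '{':
--             left_brace_count += 1
--         elif string_object[i] == '}':
--             left_brace_count -= 1
--         elif string_object[i] == '[':
--             left_square_count += 1
--         elif string_object[i] == ']':
--             left_square_count -= 1
--         if (string_object[i:i + 3] == 'red') and (left_brace_count == 1) and (left_square_count == 0):
--             return True
--     else:
--         return False
-- ===== SOURCE B (Python) =====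
-- def has_red(string_object):
--     p = string_object.find('red')
--     while p != -1:
--         pre = string_object[:p]
--         if pre.count('{') - pre.count('}') == 1 and pre.count('[') == pre.count(']'):
--             return True
--         p = string_object.find('red', p + 1)
--     return False
-- ===== Notes on version B (the rewrite author's own statement) =====
-- stated objective: faster
-- what changed: Instead of scanning every character in Python while maintaining running brace/bracket counters, B jumps between occurrences of the needle with str.find and counts the braces/brackets in the prefix before each one with str.count
import Mathlib
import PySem

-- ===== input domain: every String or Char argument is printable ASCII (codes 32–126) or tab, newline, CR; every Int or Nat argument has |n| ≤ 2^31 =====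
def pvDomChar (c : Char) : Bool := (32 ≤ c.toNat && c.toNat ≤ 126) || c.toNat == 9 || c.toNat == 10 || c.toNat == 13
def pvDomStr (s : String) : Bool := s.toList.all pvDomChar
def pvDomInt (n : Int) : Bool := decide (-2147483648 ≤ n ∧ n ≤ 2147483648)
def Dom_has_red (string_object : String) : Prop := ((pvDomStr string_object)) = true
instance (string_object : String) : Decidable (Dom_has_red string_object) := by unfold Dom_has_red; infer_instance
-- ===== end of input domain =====

-- B replaces A's char-by-char counter loop by jumping with str.find from one 'red'
-- occurrence to the next and counting brackets only in the prefix before it (objective: idiomatic).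

-- ===== PORT A =====
-- the if/elif chain updating (left_brace_count, left_square_count) with s[i]
def stepA (a : Char) (bc sq : Int) : Int × Int :=
  if a = '{' then (bc + 1, sq)
  else if a = '}' then (bc - 1, sq)
  else if a = '[' then (bc, sq + 1)
  else if a = ']' then (bc, sq - 1)
  else (bc, sq)

-- A's for-loop over i in range(len(s)-2) carrying the two counters; the
-- three-element pattern is exactly "s[i:i+3] has length 3", i.e. i ≤ len(s)-3
def hasRedLoopA : List Char → Int → Int → Bool
  | a :: b :: c :: rest, bc, sq =>
    if (a = 'r' ∧ b = 'e' ∧ c = 'd') ∧ (stepA a bc sq).1 = 1 ∧ (stepA a bc sq).2 = 0 then true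
    else hasRedLoopA (b :: c :: rest) (stepA a bc sq).1 (stepA a bc sq).2
  | _, _, _ => false

def has_red (string_object : String) : Bool :=
  hasRedLoopA string_object.toList 0 0

-- ===== PORT B =====
-- termination helper for hasRedLoopB: a non-(-1) findFrom result implies start ≤ length
theorem findFrom_ne_neg_one_start_le (s sub : List Char) (p : Nat)
    (h : PySem.Chars.findFrom s sub (p : Int) none ≠ -1) : p ≤ s.length := by
  by_contra hp
  apply h
  simp only [PySem.Chars.findFrom]
  split_ifs with h1 <;> omega

-- the while loop of Source B: p = s.find('red', …) is PySem.Chars.findFrom; s[:p] is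
-- List.take; str.count with a one-char needle is List.count (exact for 1-char needles)
def hasRedLoopB (s : List Char) (p : Nat) : Bool :=
  let q := PySem.Chars.findFrom s ['r', 'e', 'd'] (p : Int) none
  if hq : q = -1 then false
  else
    let pre := s.take q.toNat
    if ((pre.count '{' : Int) - (pre.count '}' : Int) = 1 ∧ pre.count '[' = pre.count ']') then
      true
    else hasRedLoopB s (q.toNat + 1)
termination_by s.length + 1 - p
decreasing_by
  have h1 := findFrom_ne_neg_one_start_le s ['r','e','d'] p hq
  have h2 := PySem.Chars.findFrom_natCast_spec s ['r','e','d'] p h1 hq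
  have h3 := h2.2.1.length_le
  simp only [List.length_drop] at h3
  have h4 : (p : Int) ≤ (PySem.Chars.findFrom s ['r','e','d'] (p : Int) none) := h2.1
  omega

def has_red_alt (string_object : String) : Bool :=
  hasRedLoopB string_object.toList 0

-- ===== PRECONDITION & SPEC =====
def Spec_has_red (string_object : String) (out : Bool) : Prop := out = has_red_alt string_object
instance (string_object : String) (out : Bool) : Decidable (Spec_has_red string_object out) := by unfold Spec_has_red; infer_instance

-- ===== CLAIM (what is proved, stated in full; the proofs are below) =====
def Claim_equal_has_red : Prop := ∀ (string_object : String), Dom_has_red string_object → Spec_has_red string_object (has_red string_object)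

-- ===== LEMMAS AND PROOFS =====

-- brace / square balance of a prefix
def dBr (l : List Char) : Int := (l.count '{' : Int) - (l.count '}' : Int)
def dSq (l : List Char) : Int := (l.count '[' : Int) - (l.count ']' : Int)

theorem stepA_eq (a : Char) (bc sq : Int) : stepA a bc sq = (bc + dBr [a], sq + dSq [a]) := by
  unfold stepA dBr dSq
  split_ifs with h1 h2 h3 h4 <;> subst_vars <;>
    simp_all [List.count_nil, Prod.ext_iff] <;> omega

theorem dBr_cons (a : Char) (l : List Char) : dBr (a :: l) = dBr [a] + dBr l := by
  simp [dBr, List.count_cons]; omega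

theorem dSq_cons (a : Char) (l : List Char) : dSq (a :: l) = dSq [a] + dSq l := by
  simp [dSq, List.count_cons]; omega

-- A's loop finds an in-window 'red' with counters (counted through the 'r') at (1, 0)
theorem loopA_iff (cs : List Char) (bc sq : Int) :
    hasRedLoopA cs bc sq = true ↔
      ∃ i, ['r','e','d'] <+: cs.drop i ∧
        bc + dBr (cs.take (i+1)) = 1 ∧ sq + dSq (cs.take (i+1)) = 0 := by
  induction cs generalizing bc sq with
  | nil =>
    simp only [hasRedLoopA]
    constructor
    · intro h; cases h
    · rintro ⟨i, hr, -⟩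
      have := hr.length_le; simp at this
  | cons a t ih =>
    match t with
    | [] =>
      simp only [hasRedLoopA]
      constructor
      · intro h; cases h
      · rintro ⟨i, hr, -⟩
        have := hr.length_le; simp [List.length_drop] at this; omega
    | [b] =>
      simp only [hasRedLoopA]
      constructor
      · intro h; cases h
      · rintro ⟨i, hr, -⟩
        have := hr.length_le; simp [List.length_drop] at this; omega
    | b :: c :: rest =>
      rw [hasRedLoopA]
      rw [stepA_eq]
      by_cases h : (a = 'r' ∧ b = 'e' ∧ c = 'd') ∧ bc + dBr [a] = 1 ∧ sq + dSq [a] = 0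
      · rw [if_pos h]
        obtain ⟨⟨ha, hb, hc⟩, h1, h2⟩ := h
        subst ha hb hc
        simp only [true_iff]
        refine ⟨0, ⟨rest, rfl⟩, ?_, ?_⟩ <;> simpa
      · rw [if_neg h, ih]
        constructor
        · rintro ⟨i, hr, h1, h2⟩
          refine ⟨i + 1, by simpa using hr, ?_, ?_⟩
          · rw [List.take_succ_cons, dBr_cons]; linarith
          · rw [List.take_succ_cons, dSq_cons]; linarith
        · rintro ⟨i, hr, h1, h2⟩
          match i with
          | 0 =>
            exfalso
            simp only [List.drop_zero, List.cons_prefix_cons] at hr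
            obtain ⟨ha, hb, hc, -⟩ := hr
            simp only [List.take_succ_cons, List.take_zero] at h1 h2
            exact h ⟨⟨ha.symm, hb.symm, hc.symm⟩, by simpa using h1, by simpa using h2⟩
          | j + 1 =>
            refine ⟨j, by simpa using hr, ?_, ?_⟩
            · rw [List.take_succ_cons, dBr_cons] at h1; linarith
            · rw [List.take_succ_cons, dSq_cons] at h2; linarith

theorem prefix_drop_infix {sub s : List Char} {q : Nat} (h : sub <+: s.drop q) : sub <:+: s :=
  h.isInfix.trans (s.drop_suffix q).isInfix

-- B's loop finds a 'red' occurrence whose strict prefix balances to (1, 0)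
theorem loopB_iff (s : List Char) (p : Nat) :
    hasRedLoopB s p = true ↔
      ∃ q, p ≤ q ∧ ['r','e','d'] <+: s.drop q ∧
        dBr (s.take q) = 1 ∧ (s.take q).count '[' = (s.take q).count ']' := by
  induction p using hasRedLoopB.induct (s := s) with
  | case1 p q hq =>
    replace hq : PySem.Chars.findFrom s ['r','e','d'] (p : Int) none = -1 := hq
    rw [hasRedLoopB, dif_pos hq]
    simp only [Bool.false_eq_true, false_iff, not_exists]
    rintro q ⟨hpq, hr, -⟩
    by_cases hp : p ≤ s.length
    · rw [PySem.Chars.findFrom_natCast s ['r','e','d'] p hp] at hq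
      split_ifs at hq with hfind
      · rw [PySem.Chars.find_eq_neg_one_iff] at hfind
        exact hfind (prefix_drop_infix (q := q - p)
          (by rw [List.drop_drop, show p + (q - p) = q by omega]; exact hr))
      · have := PySem.Chars.neg_one_le_find (s.drop p) ['r','e','d']
        omega
    · have := hr.length_le
      simp [List.length_drop] at this
      omega
  | case2 p q hq pre hcond =>
    replace hq : ¬ PySem.Chars.findFrom s ['r','e','d'] (p : Int) none = -1 := hq
    replace hcond : ((((s.take (PySem.Chars.findFrom s ['r','e','d'] (p : Int) none).toNat).count '{' : Int) - ((s.take (PySem.Chars.findFrom s ['r','e','d'] (p : Int) none).toNat).count '}' : Int) = 1) ∧ (s.take (PySem.Chars.findFrom s ['r','e','d'] (p : Int) none).toNat).count '[' = (s.take (PySem.Chars.findFrom s ['r','e','d'] (p : Int) none).toNat).count ']') := hcond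
    rw [hasRedLoopB, dif_neg hq, if_pos hcond]
    have h1 := findFrom_ne_neg_one_start_le s ['r','e','d'] p hq
    have h2 := PySem.Chars.findFrom_natCast_spec s ['r','e','d'] p h1 hq
    simp only [true_iff]
    exact ⟨(PySem.Chars.findFrom s ['r','e','d'] (p : Int) none).toNat,
      by have := h2.1; omega, h2.2.1, by simpa [dBr] using hcond.1, hcond.2⟩
  | case3 p q hq pre hcond ih =>
    replace hq : ¬ PySem.Chars.findFrom s ['r','e','d'] (p : Int) none = -1 := hq
    replace hcond : ¬ ((((s.take (PySem.Chars.findFrom s ['r','e','d'] (p : Int) none).toNat).count '{' : Int) - ((s.take (PySem.Chars.findFrom s ['r','e','d'] (p : Int) none).toNat).count '}' : Int) = 1) ∧ (s.take (PySem.Chars.findFrom s ['r','e','d'] (p : Int) none).toNat).count '[' = (s.take (PySem.Chars.findFrom s ['r','e','d'] (p : Int) none).toNat).count ']') := hcond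
    rw [hasRedLoopB, dif_neg hq, if_neg hcond, ih]
    have h1 := findFrom_ne_neg_one_start_le s ['r','e','d'] p hq
    have h2 := PySem.Chars.findFrom_natCast_spec s ['r','e','d'] p h1 hq
    set qn := (PySem.Chars.findFrom s ['r','e','d'] (p : Int) none).toNat with hqn
    constructor
    · rintro ⟨q, hpq, hr, hcnt⟩
      exact ⟨q, by omega, hr, hcnt⟩
    · rintro ⟨q, hpq, hr, hcnt⟩
      refine ⟨q, ?_, hr, hcnt⟩
      rcases Nat.lt_or_ge q (qn + 1) with hlt | hge
      · rcases Nat.lt_or_ge q qn with hlt2 | hge2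
        · exact absurd hr (h2.2.2 q hpq hlt2)
        · have : q = qn := by omega
          subst this
          exact absurd ⟨by simpa [dBr] using hcnt.1, hcnt.2⟩ hcond
      · exact hge

-- at a 'red' position, the prefix including the 'r' is the strict prefix plus an 'r'
theorem take_succ_red (cs : List Char) (i : Nat) (h : ['r','e','d'] <+: cs.drop i) :
    cs.take (i+1) = cs.take i ++ ['r'] := by
  obtain ⟨t, ht⟩ := h
  rw [List.take_add]
  congr 1
  have : cs.drop i = 'r' :: ('e' :: 'd' :: t) := by simpa using ht.symm
  rw [this]
  rfl

-- ===== VERDICT (by name: the statement is the Claim_ definition above) =====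
theorem has_red_spec : Claim_equal_has_red := by
  intro s _
  unfold Spec_has_red has_red has_red_alt
  rw [Bool.eq_iff_iff, loopA_iff, loopB_iff]
  constructor
  · rintro ⟨i, hr, h1, h2⟩
    refine ⟨i, Nat.zero_le _, hr, ?_, ?_⟩
    · rw [take_succ_red s.toList i hr] at h1
      simp [dBr, List.count_append] at h1 ⊢
      omega
    · rw [take_succ_red s.toList i hr] at h2
      simp [dSq, List.count_append] at h2
      omega
  · rintro ⟨q, -, hr, h1, h2⟩
    refine ⟨q, hr, ?_, ?_⟩
    · rw [take_succ_red s.toList q hr]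
      simp [dBr, List.count_append] at h1 ⊢
      omega
    · rw [take_succ_red s.toList q hr]
      simp [dSq, List.count_append]
      omega
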